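-- pv_equiv track=rewrite | github.com/vpc-ccg/freddie | py/freddie_segment.py | non_desert
-- ===== SOURCE A (Python) =====
-- from itertools import combinations, groupby
--
-- def non_desert(y, jump=10):
--     l = list()
--     for k, group in groupby(enumerate(y), lambda x: x[1] > 0):
--         if not k:
--             continue
--         group = list(group)
--         f_idx = group[0][0]
--         l_idx = group[-1][0]
--         if len(l) == 0:
--             l.append([f_idx, l_idx])
--         elif l_idx - l[-1][-1] < jump:
--             l[-1][-1] = l_idx
--         else:
--             l.append([f_idx, l_idx])
--     return l
-- ===== SOURCE B (Python) =====
-- def non_desert(y, jump=10):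
--     # Key fact: A's merge only ever overwrites the END of the last interval, so the
--     # gap test always compares consecutive run ends.  Hence every interval boundary
--     # can be classified LOCALLY: a run opens a new interval iff its end is >= jump
--     # past the previous run's end.  B therefore never keeps merge state: it marks
--     # run starts/ends by comparing each element with its neighbour, flags the
--     # boundaries pairwise, and assembles intervals from the kept starts and ends.
--     starts = [i for (i, v), p in zip(enumerate(y), [0] + y) if v > 0 >= p]
--     ends = [i for (i, v), nx in zip(enumerate(y), y[1:] + [0]) if v > 0 >= nx]
--     new = [True] + [e - pe >= jump for pe, e in zip(ends, ends[1:])]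
--     out_starts = [s for s, b in zip(starts, new) if b]
--     out_ends = [pe for pe, b in zip(ends, new[1:]) if b] + ends[-1:]
--     return [[s, e] for s, e in zip(out_starts, out_ends)]
-- ===== Notes on version B (the rewrite author's own statement) =====
-- stated objective: alternative
-- what changed: B exploits that A's merge only ever overwrites the last interval's end, so the gap test always compares consecutive run ends; B therefore keeps no merge state at all: it marks run starts/ends by neighbour comparison, flags each boundary pairwise (end - previous end >= jump), and zips the kept starts with the kept ends.
import Mathlib
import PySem

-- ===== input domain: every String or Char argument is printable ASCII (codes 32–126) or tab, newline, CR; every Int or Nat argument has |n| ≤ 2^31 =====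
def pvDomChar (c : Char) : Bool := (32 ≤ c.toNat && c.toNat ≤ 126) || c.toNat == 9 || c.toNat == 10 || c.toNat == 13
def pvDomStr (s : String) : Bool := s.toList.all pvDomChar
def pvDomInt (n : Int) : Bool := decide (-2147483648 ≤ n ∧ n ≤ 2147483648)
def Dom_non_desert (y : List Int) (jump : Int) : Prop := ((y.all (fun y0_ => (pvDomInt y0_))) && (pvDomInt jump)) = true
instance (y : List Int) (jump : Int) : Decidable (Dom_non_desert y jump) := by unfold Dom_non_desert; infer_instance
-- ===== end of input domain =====

-- B replaces A's stateful groupby-and-merge loop by stateless local boundary classification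
-- (neighbour comparisons + pairwise gap flags + zip assembly); same O(n) cost.

-- ===== PORT A =====
-- itertools.groupby specialised to a Bool key: consecutive elements with equal key form one group.
def pyGroupByKey {α : Type} (key : α → Bool) : List α → List (Bool × List α)
  | [] => []
  | x :: xs =>
    (key x, x :: xs.takeWhile (fun a => key a == key x)) ::
      pyGroupByKey key (xs.dropWhile (fun a => key a == key x))
  termination_by l => l.length
  decreasing_by
    simp only [List.length_cons]
    exact Nat.lt_succ_of_le (List.length_dropWhile_le _ _)

-- the body of A's for-loop (l[-1][-1] = l_idx becomes dropLast-and-reappend)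
def aStep (jump : Int) (l : List (List Int)) (kg : Bool × List (Int × Int)) : List (List Int) :=
  if !kg.1 then l
  else
    let f_idx := (kg.2.head?.getD (0, 0)).1
    let l_idx := (kg.2.getLast?.getD (0, 0)).1
    if l.length == 0 then l ++ [[f_idx, l_idx]]
    else if l_idx - ((l.getLast?.getD []).getLast?.getD 0) < jump then
      l.dropLast ++ [(l.getLast?.getD []).dropLast ++ [l_idx]]
    else l ++ [[f_idx, l_idx]]

def non_desert (y : List Int) (jump : Int) : List (List Int) :=
  (pyGroupByKey (fun x => decide (x.2 > 0)) (PySem.List.enumerate y 0)).foldl (aStep jump) []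

-- ===== PORT B =====
-- 'x for x,b in zip(..) if b' — keep the flagged elements
def bKeep (xs : List (Int × Bool)) : List Int :=
  xs.filterMap (fun p => if p.2 then some p.1 else none)

def non_desert_alt (y : List Int) (jump : Int) : List (List Int) :=
  -- starts = [i for (i,v),p in zip(enumerate(y), [0]+y) if v > 0 >= p]
  let starts := ((PySem.List.enumerate y 0).zip ((0:Int) :: y)).filterMap
      (fun x => if x.1.2 > 0 ∧ 0 ≥ x.2 then some x.1.1 else none)
  -- ends = [i for (i,v),nx in zip(enumerate(y), y[1:]+[0]) if v > 0 >= nx]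
  let ends := ((PySem.List.enumerate y 0).zip (y.tail ++ [0])).filterMap
      (fun x => if x.1.2 > 0 ∧ 0 ≥ x.2 then some x.1.1 else none)
  -- new = [True] + [e - pe >= jump for pe,e in zip(ends, ends[1:])]
  let newF := true :: (ends.zip ends.tail).map (fun p => decide (p.2 - p.1 ≥ jump))
  let outS := bKeep (starts.zip newF)
  -- ends[-1:] ported by hand as the last-element-or-empty list (exact)
  let outE := bKeep (ends.zip newF.tail) ++ (match ends.getLast? with | some e => [e] | none => [])
  (outS.zip outE).map (fun p => [p.1, p.2])

-- ===== PRECONDITION & SPEC =====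
def Spec_non_desert (y : List Int) (jump : Int) (out : List (List Int)) : Prop := out = non_desert_alt y jump
instance (y : List Int) (jump : Int) (out : List (List Int)) : Decidable (Spec_non_desert y jump out) := by unfold Spec_non_desert; infer_instance

-- ===== CLAIM (what is proved, stated in full; the proofs are below) =====
def Claim_equal_non_desert : Prop := ∀ (y : List Int) (jump : Int), Dom_non_desert y jump → Spec_non_desert y jump (non_desert y jump)

-- ===== LEMMAS AND PROOFS =====

-- reference run list: specRuns n y st = the positive runs of y, indices starting at n, st = open run start
def specRuns : Int → List Int → Option Int → List (Int × Int)
  | _, [], none => []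
  | n, [], some s => [(s, n - 1)]
  | n, v :: vs, none => if v > 0 then specRuns (n+1) vs (some n) else specRuns (n+1) vs none
  | n, v :: vs, some s => if v > 0 then specRuns (n+1) vs (some s) else (s, n - 1) :: specRuns (n+1) vs none

-- A's loop body once the group is reduced to its (first index, last index) pair
def aPairStep (jump : Int) (l : List (List Int)) (fe : Int × Int) : List (List Int) :=
  if l.length == 0 then l ++ [[fe.1, fe.2]]
  else if fe.2 - ((l.getLast?.getD []).getLast?.getD 0) < jump then
    l.dropLast ++ [(l.getLast?.getD []).dropLast ++ [fe.2]]
  else l ++ [[fe.1, fe.2]]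

-- reference grouping: runs grouped by the local break test e' - e >= jump
def groupRuns (jump : Int) : Int → Int → List (Int × Int) → List (List Int)
  | f, e, [] => [[f, e]]
  | f, e, (f', e') :: rs =>
      if e' - e < jump then groupRuns jump f e' rs else [f, e] :: groupRuns jump f' e' rs

lemma specRuns_skip (blk : List Int) (h : ∀ w ∈ blk, ¬ w > 0) :
    ∀ (rest : List Int) (n : Int), specRuns n (blk ++ rest) none = specRuns (n + blk.length) rest none := by
  induction blk with
  | nil => intro rest n; simp
  | cons b bs ih =>
      intro rest n
      have hb : ¬ b > 0 := h b (by simp)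
      simp only [List.cons_append, specRuns, if_neg hb]
      rw [ih (fun w hw => h w (by simp [hw])) rest (n+1)]
      congr 1
      simp
      ring

lemma specRuns_pos (blk : List Int) (h : ∀ w ∈ blk, w > 0) :
    ∀ (rest : List Int) (n s : Int), specRuns n (blk ++ rest) (some s) = specRuns (n + blk.length) rest (some s) := by
  induction blk with
  | nil => intro rest n s; simp
  | cons b bs ih =>
      intro rest n s
      have hb : b > 0 := h b (by simp)
      simp only [List.cons_append, specRuns, if_pos hb]
      rw [ih (fun w hw => h w (by simp [hw])) rest (n+1)]
      congr 1
      simp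
      ring

lemma specRuns_close (rest : List Int) (hrest : rest = [] ∨ ∃ w ws, rest = w :: ws ∧ ¬ w > 0)
    (m s : Int) : specRuns m rest (some s) = (s, m - 1) :: specRuns m rest none := by
  rcases hrest with h | ⟨w, ws, h, hw⟩
  · subst h; simp [specRuns]
  · subst h; simp [specRuns, if_neg hw]

-- enumerate commutes with takeWhile / dropWhile for an index-blind predicate
lemma enum_takeWhile (q : Int → Bool) (vs : List Int) :
    ∀ m : Int, (PySem.List.enumerate vs m).takeWhile (fun a => q a.2) = PySem.List.enumerate (vs.takeWhile q) m := by
  induction vs with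
  | nil => intro m; simp [PySem.List.enumerate_nil]
  | cons v vs ih =>
      intro m
      by_cases hv : q v
      · simp [PySem.List.enumerate_cons, hv, ih]
      · simp [PySem.List.enumerate_cons, hv, PySem.List.enumerate_nil]

lemma enum_dropWhile (q : Int → Bool) (vs : List Int) :
    ∀ m : Int, (PySem.List.enumerate vs m).dropWhile (fun a => q a.2)
      = PySem.List.enumerate (vs.dropWhile q) (m + (vs.takeWhile q).length) := by
  induction vs with
  | nil => intro m; simp [PySem.List.enumerate_nil]
  | cons v vs ih =>
      intro m
      by_cases hv : q v
      · rw [PySem.List.enumerate_cons]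
        rw [List.dropWhile_cons_of_pos (by simpa using hv)]
        rw [ih (m+1)]
        rw [List.dropWhile_cons_of_pos (by simpa using hv), List.takeWhile_cons_of_pos (by simpa using hv)]
        congr 1
        simp
        ring
      · rw [PySem.List.enumerate_cons]
        rw [List.dropWhile_cons_of_neg (by simpa using hv)]
        rw [List.dropWhile_cons_of_neg (by simpa using hv), List.takeWhile_cons_of_neg (by simpa using hv)]
        simp [PySem.List.enumerate_cons]

lemma enum_fst_getLast (xs : List Int) :
    ∀ m : Int, xs ≠ [] → ((PySem.List.enumerate xs m).getLast?.getD (0,0)).1 = m + xs.length - 1 := by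
  induction xs with
  | nil => intro m h; exact absurd rfl h
  | cons x xs ih =>
      intro m _
      rcases eq_or_ne xs [] with h | h
      · subst h; simp [PySem.List.enumerate_cons, PySem.List.enumerate_nil]
      · rw [PySem.List.enumerate_cons]
        have hne : PySem.List.enumerate xs (m+1) ≠ [] := by
          intro hc
          have := congrArg List.length hc
          simp [PySem.List.length_enumerate] at this
          exact h this
        rw [List.getLast?_cons, Option.getD_some]
        have hrec := ih (m+1) h
        cases hgl : (PySem.List.enumerate xs (m+1)).getLast? with
        | none => exact absurd (List.getLast?_eq_none_iff.mp hgl) hne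
        | some p =>
            rw [hgl] at hrec
            simp only [Option.getD_some] at hrec ⊢
            rw [hrec]
            simp
            ring

-- heads of dropWhile fail the predicate
lemma dropWhile_head_not (q : Int → Bool) (vs : List Int) :
    vs.dropWhile q = [] ∨ ∃ w ws, vs.dropWhile q = w :: ws ∧ q w = false := by
  induction vs with
  | nil => left; rfl
  | cons v vs ih =>
      by_cases hv : q v
      · rw [List.dropWhile_cons_of_pos hv]; exact ih
      · right; exact ⟨v, vs, List.dropWhile_cons_of_neg hv, by simpa using hv⟩

-- Lemma A1: A's fold over the groupby groups equals a fold of aPairStep over specRuns.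
lemma a_fold_eq (jump : Int) (y : List Int) (n : Int) (l : List (List Int)) :
    (pyGroupByKey (fun x => decide (x.2 > 0)) (PySem.List.enumerate y n)).foldl (aStep jump) l
      = (specRuns n y none).foldl (aPairStep jump) l := by
  match y with
  | [] => simp [PySem.List.enumerate_nil, pyGroupByKey, specRuns]
  | v :: vs =>
    rw [PySem.List.enumerate_cons, pyGroupByKey, List.foldl_cons]
    by_cases hv : v > 0
    · -- positive block: one true group, yielding one run
      have hqk : (fun (a : Int × Int) => decide (a.2 > 0) == decide ((n, v).2 > 0))
               = (fun (a : Int × Int) => (fun w : Int => decide (w > 0)) a.2) := by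
        funext a; simp [hv]
      rw [hqk, enum_takeWhile (fun w : Int => decide (w > 0)) vs (n+1),
          enum_dropWhile (fun w : Int => decide (w > 0)) vs (n+1),
          show decide ((n, v).2 > 0) = true from by simp [hv]]
      have hgrp : aStep jump l (true,
            (n, v) :: PySem.List.enumerate (vs.takeWhile (fun w : Int => decide (w > 0))) (n+1))
          = aPairStep jump l
              (n, n + ((vs.takeWhile (fun w : Int => decide (w > 0))).length : Int)) := by
        have hL : ((((n, v) :: PySem.List.enumerate
                (vs.takeWhile (fun w : Int => decide (w > 0))) (n+1))).getLast?.getD (0,0)).1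
              = n + ((vs.takeWhile (fun w : Int => decide (w > 0))).length : Int) := by
          rw [← PySem.List.enumerate_cons, enum_fst_getLast _ n (by simp)]
          simp only [List.length_cons]
          push_cast
          ring
        simp [aStep, aPairStep, hL]
      rw [hgrp]
      rw [a_fold_eq jump (vs.dropWhile (fun w : Int => decide (w > 0)))
            (n + 1 + ((vs.takeWhile (fun w : Int => decide (w > 0))).length : Int))
            (aPairStep jump l (n, n + ((vs.takeWhile (fun w : Int => decide (w > 0))).length : Int)))]
      conv_rhs => rw [show specRuns n (v :: vs) none = specRuns (n+1) vs (some n) from by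
        simp [specRuns, hv]]
      conv_rhs => rw [show vs = vs.takeWhile (fun w : Int => decide (w > 0))
            ++ vs.dropWhile (fun w : Int => decide (w > 0)) from List.takeWhile_append_dropWhile.symm]
      rw [specRuns_pos _ (fun w hw => by simpa using List.mem_takeWhile_imp hw)]
      rw [specRuns_close (vs.dropWhile (fun w : Int => decide (w > 0)))
            (by rcases dropWhile_head_not (fun w : Int => decide (w > 0)) vs with h | ⟨w, ws, h, hw⟩
                · exact Or.inl h
                · exact Or.inr ⟨w, ws, h, by simpa using hw⟩)]
      rw [List.foldl_cons]
      rw [show (n + 1 + ((vs.takeWhile (fun w : Int => decide (w > 0))).length : Int)) - 1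
            = n + ((vs.takeWhile (fun w : Int => decide (w > 0))).length : Int) from by ring]
    · -- non-positive block: the whole false group is skipped
      have hqk : (fun (a : Int × Int) => decide (a.2 > 0) == decide ((n, v).2 > 0))
               = (fun (a : Int × Int) => (fun w : Int => !decide (w > 0)) a.2) := by
        funext a; simp [hv]
      rw [hqk, enum_takeWhile (fun w : Int => !decide (w > 0)) vs (n+1),
          enum_dropWhile (fun w : Int => !decide (w > 0)) vs (n+1)]
      rw [show aStep jump l (decide ((n, v).2 > 0),
            (n, v) :: PySem.List.enumerate (vs.takeWhile (fun w : Int => !decide (w > 0))) (n+1)) = l from by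
        simp [aStep, hv]]
      rw [a_fold_eq jump (vs.dropWhile (fun w : Int => !decide (w > 0)))
            (n + 1 + ((vs.takeWhile (fun w : Int => !decide (w > 0))).length : Int)) l]
      conv_rhs => rw [show specRuns n (v :: vs) none = specRuns (n+1) vs none from by
        simp [specRuns, hv]]
      conv_rhs => rw [show vs = vs.takeWhile (fun w : Int => !decide (w > 0))
            ++ vs.dropWhile (fun w : Int => !decide (w > 0)) from List.takeWhile_append_dropWhile.symm]
      rw [specRuns_skip _ (fun w hw => by simpa using List.mem_takeWhile_imp hw)]
termination_by y.length
decreasing_by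
  all_goals
    simp only [List.length_cons]
    exact Nat.lt_succ_of_le (List.length_dropWhile_le _ _)

-- Lemma A2: the aPairStep fold is the groupRuns grouping.
lemma fold_aPair (jump : Int) (rs : List (Int × Int)) :
    ∀ (f e : Int) (acc : List (List Int)),
      rs.foldl (aPairStep jump) (acc ++ [[f, e]]) = acc ++ groupRuns jump f e rs := by
  induction rs with
  | nil => intro f e acc; simp [groupRuns]
  | cons r rs ih =>
      intro f e acc
      obtain ⟨f', e'⟩ := r
      rw [List.foldl_cons]
      have hlen : (((acc ++ [[f, e]]).length) == 0) = false := by simp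
      have hgl : (acc ++ [[f, e]]).getLast?.getD [] = [f, e] := by simp
      by_cases hc : e' - e < jump
      · have hstep : aPairStep jump (acc ++ [[f, e]]) (f', e') = acc ++ [[f, e']] := by
          simp only [aPairStep, hlen, hgl]
          rw [if_neg (by simp), if_pos (by simpa using hc)]
          simp
        rw [hstep, ih f e' acc]
        simp [groupRuns, hc]
      · have hstep : aPairStep jump (acc ++ [[f, e]]) (f', e')
            = (acc ++ [[f, e]]) ++ [[f', e']] := by
          simp only [aPairStep, hlen, hgl]
          rw [if_neg (by simp), if_neg (by simpa using hc)]
        rw [hstep, ih f' e' (acc ++ [[f, e]])]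
        simp [groupRuns, hc]

-- B's starts/ends comprehensions, as functions of the scanned suffix
def bStarts (n : Int) (y : List Int) (p : Int) : List Int :=
  ((PySem.List.enumerate y n).zip (p :: y)).filterMap
    (fun x => if x.1.2 > 0 ∧ 0 ≥ x.2 then some x.1.1 else none)

def bEnds (n : Int) (y : List Int) : List Int :=
  ((PySem.List.enumerate y n).zip (y.tail ++ [0])).filterMap
    (fun x => if x.1.2 > 0 ∧ 0 ≥ x.2 then some x.1.1 else none)

lemma bStarts_cons (n : Int) (v : Int) (vs : List Int) (p : Int) :
    bStarts n (v :: vs) p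
      = (if v > 0 ∧ 0 ≥ p then [n] else []) ++ bStarts (n+1) vs v := by
  simp only [bStarts, PySem.List.enumerate_cons, List.zip_cons_cons, List.filterMap_cons]
  by_cases h : v > 0 ∧ 0 ≥ p <;> simp [h]

lemma bEnds_cons (n : Int) (v : Int) (vs : List Int) :
    bEnds n (v :: vs)
      = (if v > 0 ∧ 0 ≥ vs.headD 0 then [n] else []) ++ bEnds (n+1) vs := by
  cases vs with
  | nil =>
      by_cases h : v > 0 <;>
        simp [bEnds, PySem.List.enumerate_cons, PySem.List.enumerate_nil, h]
  | cons w ws =>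
      simp only [bEnds, PySem.List.enumerate_cons, List.tail_cons, List.cons_append,
        List.zip_cons_cons, List.filterMap_cons]
      by_cases h : v > 0 ∧ 0 ≥ w <;> simp [h]

-- Lemma B1: the starts comprehension lists the first indices of the runs.
lemma starts_eq (y : List Int) :
    ∀ (n p : Int), (p ≤ 0 → bStarts n y p = (specRuns n y none).map Prod.fst)
      ∧ (p > 0 → ∀ s, (specRuns n y (some s)).map Prod.fst = s :: bStarts n y p) := by
  induction y with
  | nil =>
      intro n p
      constructor
      · intro _; simp [bStarts, PySem.List.enumerate_nil, specRuns]
      · intro _ s; simp [bStarts, PySem.List.enumerate_nil, specRuns]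
  | cons v vs ih =>
      intro n p
      constructor
      · intro hp
        rw [bStarts_cons]
        by_cases hv : v > 0
        · rw [if_pos ⟨hv, hp⟩]
          rw [show specRuns n (v :: vs) none = specRuns (n+1) vs (some n) from by
            simp [specRuns, hv]]
          rw [((ih (n+1) v).2 hv n)]
          simp
        · rw [if_neg (by tauto)]
          rw [show specRuns n (v :: vs) none = specRuns (n+1) vs none from by
            simp [specRuns, hv]]
          have h0 : v ≤ 0 := by omega
          simpa using (ih (n+1) v).1 h0
      · intro hp s
        rw [bStarts_cons, if_neg (by intro h; exact absurd h.2 (by simpa using hp))]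
        by_cases hv : v > 0
        · rw [show specRuns n (v :: vs) (some s) = specRuns (n+1) vs (some s) from by
            simp [specRuns, hv]]
          simpa using ((ih (n+1) v).2 hv s)
        · rw [show specRuns n (v :: vs) (some s) = (s, n - 1) :: specRuns (n+1) vs none from by
            simp [specRuns, hv]]
          have h0 : v ≤ 0 := by omega
          simp [(ih (n+1) v).1 h0]

-- Lemma B2: the ends comprehension lists the last indices of the runs.
lemma ends_eq (y : List Int) :
    ∀ (n : Int), (bEnds n y = (specRuns n y none).map Prod.snd)
      ∧ (∀ s, (specRuns n y (some s)).map Prod.snd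
          = if y.headD 0 > 0 then bEnds n y else (n - 1) :: bEnds n y) := by
  induction y with
  | nil =>
      intro n
      constructor
      · simp [bEnds, PySem.List.enumerate_nil, specRuns]
      · intro s; simp [bEnds, PySem.List.enumerate_nil, specRuns]
  | cons v vs ih =>
      intro n
      constructor
      · rw [bEnds_cons]
        by_cases hv : v > 0
        · rw [show specRuns n (v :: vs) none = specRuns (n+1) vs (some n) from by
            simp [specRuns, hv]]
          rw [(ih (n+1)).2 n]
          have hsub : n + 1 - 1 = n := by ring
          by_cases hw : vs.headD 0 > 0
          · rw [if_pos hw, if_neg (by intro h; exact absurd h.2 (by omega))]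
            simp
          · rw [if_neg hw, if_pos ⟨hv, by omega⟩, hsub]
            simp
        · rw [show specRuns n (v :: vs) none = specRuns (n+1) vs none from by
            simp [specRuns, hv]]
          rw [if_neg (by intro h; exact absurd h.1 hv), (ih (n+1)).1]
          simp
      · intro s
        by_cases hv : v > 0
        · rw [show specRuns n (v :: vs) (some s) = specRuns (n+1) vs (some s) from by
            simp [specRuns, hv]]
          rw [(ih (n+1)).2 s]
          simp only [List.headD_cons]
          rw [if_pos hv, bEnds_cons]
          have hsub : n + 1 - 1 = n := by ring
          by_cases hw : vs.headD 0 > 0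
          · rw [if_pos hw, if_neg (by intro h; exact absurd h.2 (by omega))]
            simp
          · rw [if_neg hw, if_pos ⟨hv, by omega⟩, hsub]
            simp
        · rw [show specRuns n (v :: vs) (some s) = (s, n - 1) :: specRuns (n+1) vs none from by
            simp [specRuns, hv]]
          simp only [List.headD_cons]
          rw [if_neg hv, bEnds_cons, if_neg (by intro h; exact absurd h.1 hv), (ih (n+1)).1]
          simp

-- B's assembly phase as a function of the start/end lists
def bAssemble (jump : Int) (starts ends : List Int) : List (List Int) :=
  let newF := true :: (ends.zip ends.tail).map (fun p => decide (p.2 - p.1 ≥ jump))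
  let outS := bKeep (starts.zip newF)
  let outE := bKeep (ends.zip newF.tail) ++ (match ends.getLast? with | some e => [e] | none => [])
  (outS.zip outE).map (fun p => [p.1, p.2])

-- Lemma B3: on the projections of a run list, the assembly equals the groupRuns grouping.
lemma assemble_eq (jump : Int) (rs : List (Int × Int)) :
    ∀ (f e : Int),
      bAssemble jump (f :: rs.map Prod.fst) (e :: rs.map Prod.snd) = groupRuns jump f e rs := by
  induction rs with
  | nil => intro f e; simp [bAssemble, bKeep, groupRuns]
  | cons r rs ih =>
      intro f e
      obtain ⟨f', e'⟩ := r
      by_cases hc : e' - e < jump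
      · have hflag : (decide (e' - e ≥ jump)) = false := by simpa using hc
        rw [show groupRuns jump f e ((f', e') :: rs) = groupRuns jump f e' rs from by
          simp [groupRuns, hc]]
        rw [← ih f e']
        simp only [bAssemble, bKeep, List.map_cons, List.tail_cons, List.zip_cons_cons,
          List.map_cons, List.filterMap_cons, hflag]
        simp
      · have hflag : (decide (e' - e ≥ jump)) = true := by simpa using not_lt.mp hc
        rw [show groupRuns jump f e ((f', e') :: rs) = [f, e] :: groupRuns jump f' e' rs from by
          simp [groupRuns, hc]]
        rw [← ih f' e']
        simp only [bAssemble, bKeep, List.map_cons, List.tail_cons, List.zip_cons_cons,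
          List.map_cons, List.filterMap_cons, hflag]
        simp

-- B's port, re-expressed through the proof-side helpers (definitional)
lemma alt_eq_assemble (y : List Int) (jump : Int) :
    non_desert_alt y jump = bAssemble jump (bStarts 0 y 0) (bEnds 0 y) := by
  rfl

-- ===== VERDICT (by name: the statement is the Claim_ definition above) =====
theorem non_desert_spec : Claim_equal_non_desert := by
  intro y jump _
  unfold Spec_non_desert
  rw [non_desert, a_fold_eq jump y 0 [], alt_eq_assemble]
  rw [(starts_eq y 0 0).1 le_rfl, (ends_eq y 0).1]
  cases hR : specRuns 0 y none with
  | nil => simp [bAssemble, bKeep]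
  | cons r rs =>
      obtain ⟨f, e⟩ := r
      rw [List.map_cons, List.map_cons, assemble_eq, List.foldl_cons,
          show aPairStep jump [] (f, e) = [] ++ [[f, e]] from by simp [aPairStep]]
      exact (fold_aPair jump rs f e []).trans (by simp)
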